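-- pv_equiv track=rewrite | github.com/RiccPicc/consequence | consequence/filter_consensus.py | get_position_dictionary
-- ===== SOURCE A (Python) =====
-- def count_base(base, row):
--     return row.count(base)
--
-- def get_position_dictionary(matrix):
--     """
--     Given a matrix, this function creates a dictionary containing a dictionary of all bases counted in that position.
--     """
--     positions = {}
--     i = 0
--     while i < len(matrix):
--         bases = {}
--         for base in list("atgc"):
--             bases[base] = count_base(base, matrix[i])
--         bases["gaps"] = count_base("-", matrix[i])
--         bases["other"] = len(matrix[i]) - (bases["a"]+bases["c"]+bases["g"]+bases["t"]+bases["gaps"])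
--         bases["non-gaps"] = len(matrix[i]) - bases["gaps"]
--         bases["length"] = len(matrix[i])
--         positions[i] = bases
--         i += 1
--     return positions
-- ===== SOURCE B (Python) =====
-- def tally(s):
--     """Divide and conquer: split s in half, tally each half, add the 5-tuples
--     (a, t, g, c, gaps). Correct because counts are additive over concatenation."""
--     if len(s) == 0:
--         return (0, 0, 0, 0, 0)
--     if len(s) == 1:
--         ch = s[0]
--         return (1 if ch == 'a' else 0, 1 if ch == 't' else 0,
--                 1 if ch == 'g' else 0, 1 if ch == 'c' else 0,
--                 1 if ch == '-' else 0)
--     mid = len(s) // 2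
--     a1, t1, g1, c1, d1 = tally(s[:mid])
--     a2, t2, g2, c2, d2 = tally(s[mid:])
--     return (a1 + a2, t1 + t2, g1 + g2, c1 + c2, d1 + d2)
--
-- def row_dict(row):
--     a, t, g, c, gaps = tally(row)
--     n = len(row)
--     return {"a": a, "t": t, "g": g, "c": c, "gaps": gaps,
--             "other": n - (a + t + g + c + gaps),
--             "non-gaps": n - gaps, "length": n}
--
-- def get_position_dictionary(matrix):
--     return {i: row_dict(row) for i, row in enumerate(matrix)}
-- ===== Notes on version B (the rewrite author's own statement) =====
-- stated objective: alternative
-- what changed: Per row, a recursive divide-and-conquer tally splits the string in half and merges (a,t,g,c,gaps) 5-tuples, replacing A's five independent .count() linear scans; the row dict is derived from the one 5-tuple and the top level is an enumerate dict comprehension instead of A's index while-loop.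
import Mathlib
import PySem

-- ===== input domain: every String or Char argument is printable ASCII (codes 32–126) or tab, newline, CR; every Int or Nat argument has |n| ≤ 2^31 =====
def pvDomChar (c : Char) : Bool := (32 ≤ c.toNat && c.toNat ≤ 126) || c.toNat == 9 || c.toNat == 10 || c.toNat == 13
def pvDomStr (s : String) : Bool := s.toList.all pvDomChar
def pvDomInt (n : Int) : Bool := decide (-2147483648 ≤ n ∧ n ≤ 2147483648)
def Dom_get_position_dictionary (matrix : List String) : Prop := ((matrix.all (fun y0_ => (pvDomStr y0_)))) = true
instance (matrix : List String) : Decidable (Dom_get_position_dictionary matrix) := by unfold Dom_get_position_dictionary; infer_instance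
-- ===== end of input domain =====

-- B replaces A's five independent .count scans per row by one recursive
-- divide-and-conquer tally merging (a,t,g,c,gaps) 5-tuples; same cost, different algorithm.

-- ===== PORT A =====
def count_base (base : String) (row : String) : Int := (PySem.Str.count row base : Int)

-- loop body of A's while loop: builds the `bases` dict for one row
-- (Python's bases["a"] etc. read keys that are always present, so `getD _ 0` never sees its default)
def gpdRowA (row : String) : PySem.Dict String Int :=
  let bases := (["a", "t", "g", "c"] : List String).foldl
      (fun b base => b.insert base (count_base base row)) PySem.Dict.empty
  let bases := bases.insert "gaps" (count_base "-" row)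
  let bases := bases.insert "other" (PySem.Str.len row -
      (bases.getD "a" 0 + bases.getD "c" 0 + bases.getD "g" 0 + bases.getD "t" 0 + bases.getD "gaps" 0))
  let bases := bases.insert "non-gaps" (PySem.Str.len row - bases.getD "gaps" 0)
  let bases := bases.insert "length" (PySem.Str.len row)
  bases

def gpdLoopA (matrix : List String) (i : Nat)
    (positions : PySem.Dict Int (PySem.Dict String Int)) : PySem.Dict Int (PySem.Dict String Int) :=
  if h : i < matrix.length then
    gpdLoopA matrix (i + 1) (positions.insert (i : Int) (gpdRowA matrix[i]))
  else positions
termination_by matrix.length - i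

def get_position_dictionary (matrix : List String) : List (Int × List (String × Int)) :=
  ((gpdLoopA matrix 0 PySem.Dict.empty).items).map (fun kv => (kv.1, kv.2.items))

-- ===== PORT B =====
-- Source B's tally: recursion on the halves of the character list (s[0] / s[:mid] / s[mid:])
def tallyB (s : List Char) : Int × Int × Int × Int × Int :=
  if s.length = 0 then (0, 0, 0, 0, 0)
  else if s.length = 1 then
    let ch := s.getD 0 ' '
    ((if ch = 'a' then 1 else 0), (if ch = 't' then 1 else 0),
     (if ch = 'g' then 1 else 0), (if ch = 'c' then 1 else 0),
     (if ch = '-' then 1 else 0))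
  else
    let mid := s.length / 2
    let l := tallyB (s.take mid)
    let r := tallyB (s.drop mid)
    (l.1 + r.1, l.2.1 + r.2.1, l.2.2.1 + r.2.2.1, l.2.2.2.1 + r.2.2.2.1, l.2.2.2.2 + r.2.2.2.2)
termination_by s.length
decreasing_by
  · simp; omega
  · simp; omega

def row_dictB (row : String) : List (String × Int) :=
  let t5 := tallyB row.toList
  let a := t5.1
  let t := t5.2.1
  let g := t5.2.2.1
  let c := t5.2.2.2.1
  let gaps := t5.2.2.2.2
  let n : Int := PySem.Str.len row
  [("a", a), ("t", t), ("g", g), ("c", c), ("gaps", gaps),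
   ("other", n - (a + t + g + c + gaps)), ("non-gaps", n - gaps), ("length", n)]

def get_position_dictionary_alt (matrix : List String) : List (Int × List (String × Int)) :=
  (PySem.List.enumerate matrix).map (fun p => (p.1, row_dictB p.2))

-- ===== PRECONDITION & SPEC =====
def Spec_get_position_dictionary (matrix : List String) (out : List (Int × List (String × Int))) : Prop := out = get_position_dictionary_alt matrix
instance (matrix : List String) (out : List (Int × List (String × Int))) : Decidable (Spec_get_position_dictionary matrix out) := by unfold Spec_get_position_dictionary; infer_instance

-- ===== CLAIM (what is proved, stated in full; the proofs are below) =====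
def Claim_equal_get_position_dictionary : Prop := ∀ (matrix : List String), Dom_get_position_dictionary matrix → Spec_get_position_dictionary matrix (get_position_dictionary matrix)

-- ===== LEMMAS AND PROOFS =====

theorem pv_items_empty : (PySem.Dict.empty : PySem.Dict String Int).items = [] := rfl

theorem count_go_singleton (c : Char) : ∀ (l : List Char) (fuel acc : Nat), l.length ≤ fuel →
    PySem.Chars.count.go [c] fuel l acc = acc + l.count c := by
  intro l
  induction l with
  | nil => intro fuel acc _; cases fuel <;> simp [PySem.Chars.count.go]
  | cons h t ih =>
    intro fuel acc hle
    cases fuel with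
    | zero => simp at hle
    | succ f =>
      rw [PySem.Chars.count.go]
      by_cases hc : c = h
      · subst hc
        simp only [List.isPrefixOf, beq_self_eq_true, Bool.true_and, if_pos,
          List.length_cons, List.length_nil, List.drop_succ_cons, List.drop_zero]
        rw [ih f (acc + 1) (by simp at hle; omega)]
        simp
        omega
      · have hpre : ([c].isPrefixOf (h :: t)) = false := by
          simp [List.isPrefixOf, hc]
        simp only [hpre, Bool.false_eq_true, if_false]
        rw [ih f acc (by simp at hle; omega)]
        simp [Ne.symm hc]

theorem chars_count_singleton (s : List Char) (c : Char) :
    PySem.Chars.count s [c] = s.count c := by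
  rw [PySem.Chars.count]
  simp [count_go_singleton c s s.length 0 le_rfl]

theorem count_base_eq (row : String) (b : String) (c : Char) (hb : b.toList = [c]) :
    count_base b row = ((row.toList.count c : Nat) : Int) := by
  simp [count_base, PySem.Str.count, hb, chars_count_singleton]

theorem tallyB_spec : ∀ (n : Nat) (s : List Char), s.length ≤ n →
    tallyB s = (((s.count 'a' : Nat) : Int), ((s.count 't' : Nat) : Int),
                ((s.count 'g' : Nat) : Int), ((s.count 'c' : Nat) : Int),
                ((s.count '-' : Nat) : Int)) := by
  intro n
  induction n with
  | zero =>
    intro s hs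
    have : s = [] := List.length_eq_zero_iff.mp (by omega)
    subst this
    simp [tallyB]
  | succ n ih =>
    intro s hs
    rw [tallyB]
    by_cases h0 : s.length = 0
    · have : s = [] := List.length_eq_zero_iff.mp h0
      subst this; simp
    · by_cases h1 : s.length = 1
      · obtain ⟨ch, rfl⟩ := List.length_eq_one_iff.mp h1
        simp only [h1, if_true, List.getD]
        simp [List.count_cons, List.count_nil]
      · simp only [h0, if_false, h1, if_false]
        have hm : (s.take (s.length / 2)).length ≤ n := by simp; omega
        have hd : (s.drop (s.length / 2)).length ≤ n := by simp; omega
        rw [ih _ hm, ih _ hd]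
        have hsplit : s.take (s.length / 2) ++ s.drop (s.length / 2) = s :=
          List.take_append_drop _ s
        have hc : ∀ c : Char, s.count c
            = (s.take (s.length / 2)).count c + (s.drop (s.length / 2)).count c := by
          intro c
          conv_lhs => rw [← hsplit]
          exact List.count_append
        simp [hc 'a', hc 't', hc 'g', hc 'c', hc '-']

theorem rowA_items (row : String) : (gpdRowA row).items = row_dictB row := by
  simp only [gpdRowA, row_dictB, List.foldl_cons, List.foldl_nil,
    tallyB_spec row.toList.length row.toList le_rfl]
  simp [PySem.Dict.items_insert, PySem.Dict.contains_insert, PySem.Dict.getD_insert,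
        count_base_eq row "a" 'a' (by decide), count_base_eq row "t" 't' (by decide),
        count_base_eq row "g" 'g' (by decide), count_base_eq row "c" 'c' (by decide),
        count_base_eq row "-" '-' (by decide)]
  simp only [pv_items_empty, List.nil_append]
  ring_nf

theorem loopA_items_aux (matrix : List String) : ∀ (n i : Nat) (d : PySem.Dict Int (PySem.Dict String Int)),
    matrix.length - i ≤ n → (∀ j ∈ d.keys, j < (i : Int)) →
    (gpdLoopA matrix i d).items
      = d.items ++ (PySem.List.enumerate (matrix.drop i) i).map (fun p => (p.1, gpdRowA p.2)) := by
  intro n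
  induction n with
  | zero =>
    intro i d hle _
    have hd : matrix.drop i = [] := List.drop_eq_nil_of_le (by omega)
    rw [gpdLoopA]
    simp [show ¬ i < matrix.length by omega, hd]
  | succ n ih =>
    intro i d hle hlt
    by_cases h : i < matrix.length
    · have hnc : d.contains (i : Int) = false := by
        rw [PySem.Dict.contains_eq_decide_mem_keys]
        simp only [decide_eq_false_iff_not]
        intro hmem
        exact absurd (hlt _ hmem) (by omega)
      rw [gpdLoopA]
      simp only [h, dif_pos]
      rw [ih (i + 1) _ (by omega) ?_]
      · rw [PySem.Dict.items_insert_of_not_contains _ _ hnc,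
            List.drop_eq_getElem_cons h, PySem.List.enumerate_cons]
        push_cast
        simp
      · intro j hj
        rw [PySem.Dict.keys_insert_of_not_contains _ _ hnc] at hj
        rcases List.mem_append.1 hj with hj | hj
        · have := hlt _ hj; push_cast; omega
        · simp at hj; subst hj; push_cast; omega
    · have hd : matrix.drop i = [] := List.drop_eq_nil_of_le (by omega)
      rw [gpdLoopA]
      simp [h, hd]

-- ===== VERDICT (by name: the statement is the Claim_ definition above) =====
theorem get_position_dictionary_spec : Claim_equal_get_position_dictionary := by
  intro matrix _
  show _ = _
  rw [get_position_dictionary,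
      loopA_items_aux matrix matrix.length 0 PySem.Dict.empty (by omega) (by simp [PySem.Dict.keys_empty])]
  simp [get_position_dictionary_alt, Function.comp, rowA_items, PySem.Dict.empty]
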